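-- pv_equiv track=rewrite | github.com/Jnath33/discord_games | card_game.py | start_player_to_play_list
-- ===== SOURCE A (Python) =====
-- get_next = {"n": "e", "e": "s", "s": "o", "o": "n"}
--
-- def start_player_to_play_list(f_p, s=None, l=None):
--     if l is None:
--         l = []
--     if f_p == s:
--         return l
--     else:
--         l.append(f_p)
--         if s is None:
--             return start_player_to_play_list(get_next[f_p], f_p, l)
--         else:
--             return start_player_to_play_list(get_next[f_p], s, l)
-- ===== SOURCE B (Python) =====
-- get_next = {"n": "e", "e": "s", "s": "o", "o": "n"}
--
-- def start_player_to_play_list(f_p, s=None, l=None):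
--     if l is None:
--         l = []
--     if f_p == s:
--         return l
--     stop = s if s is not None else f_p
--     current = f_p
--     while True:
--         l.append(current)
--         current = get_next[current]
--         if current == stop:
--             break
--     return l
-- ===== Notes on version B (the rewrite author's own statement) =====
-- stated objective: idiomatic
-- what changed: Replaced the tail recursion (which re-passes the accumulator and a shifting stop marker through recursive calls) by a plain iterative walk: pick stop = s or f_p once, then loop append/advance until the cursor returns to stop.
import Mathlib
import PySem

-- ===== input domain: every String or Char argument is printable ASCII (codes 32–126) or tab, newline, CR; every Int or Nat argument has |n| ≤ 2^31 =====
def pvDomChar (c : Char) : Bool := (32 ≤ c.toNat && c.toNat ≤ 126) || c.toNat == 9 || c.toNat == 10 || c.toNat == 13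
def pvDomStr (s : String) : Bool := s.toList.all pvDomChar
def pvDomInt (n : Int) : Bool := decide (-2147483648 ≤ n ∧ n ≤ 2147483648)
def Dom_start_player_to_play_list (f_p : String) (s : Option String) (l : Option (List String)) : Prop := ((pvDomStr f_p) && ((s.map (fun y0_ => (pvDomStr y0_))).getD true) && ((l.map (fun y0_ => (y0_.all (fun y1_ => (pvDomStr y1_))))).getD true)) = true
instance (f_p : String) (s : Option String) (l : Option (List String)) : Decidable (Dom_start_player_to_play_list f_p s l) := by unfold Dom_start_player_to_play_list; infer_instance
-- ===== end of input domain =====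

-- B replaces A's tail recursion by an explicit loop (idiomatic); equivalence is about the
-- RETURN value only (both Pythons mutate the passed-in list l in place identically).

-- ===== PORT A =====
def get_next : PySem.Dict String String :=
  PySem.Dict.ofList [("n", "e"), ("e", "s"), ("s", "o"), ("o", "n")]

-- A's tail recursion; fuel 5 covers every input admitted by Pre_ (the 4-cycle needs at
-- most 4 recursive calls); on fuel exhaustion or KeyError (both outside Pre_) it returns l.
def goA : Nat → String → Option String → List String → List String
  | 0, _, _, l => l
  | fuel + 1, f_p, s, l =>
    if some f_p == s then l
    else
      let l := l ++ [f_p]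
      match PySem.Dict.get? get_next f_p with
      | none => l   -- KeyError in Python (outside Pre_)
      | some nxt =>
        match s with
        | none => goA fuel nxt (some f_p) l
        | some _ => goA fuel nxt s l

def start_player_to_play_list (f_p : String) (s : Option String) (l : Option (List String)) : List String :=
  goA 5 f_p s (l.getD [])

-- ===== PORT B =====
-- B's while-loop: append current, advance, break when current == stop; fuel 4 covers
-- every input admitted by Pre_ (Python B loops forever / raises only outside Pre_).
def goB : Nat → String → String → List String → List String
  | 0, _, _, acc => acc
  | fuel + 1, current, stop, acc =>
    let acc := acc ++ [current]
    match PySem.Dict.get? get_next current with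
    | none => acc   -- KeyError in Python (outside Pre_)
    | some nxt => if nxt == stop then acc else goB fuel nxt stop acc

def start_player_to_play_list_alt (f_p : String) (s : Option String) (l : Option (List String)) : List String :=
  let l0 := l.getD []
  if some f_p == s then l0
  else goB 4 f_p (s.getD f_p) l0

-- ===== PRECONDITION & SPEC =====
-- Pre_ excludes inputs where A raises KeyError (f_p not a player and f_p ≠ s) or
-- recurses forever until RecursionError (s a string that is never reached in the cycle).
def Pre_start_player_to_play_list (f_p : String) (s : Option String) (l : Option (List String)) : Prop :=
  s = some f_p ∨
    (f_p ∈ (["n", "e", "s", "o"] : List String) ∧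
      (s = none ∨ ∃ x ∈ (["n", "e", "s", "o"] : List String), s = some x))
instance (f_p : String) (s : Option String) (l : Option (List String)) : Decidable (Pre_start_player_to_play_list f_p s l) := by unfold Pre_start_player_to_play_list; infer_instance

def pvWitness_start_player_to_play_list : String × Option String × Option (List String) :=
  ("n", some "s", some ["z"])

def Spec_start_player_to_play_list (f_p : String) (s : Option String) (l : Option (List String)) (out : List String) : Prop := out = start_player_to_play_list_alt f_p s l
instance (f_p : String) (s : Option String) (l : Option (List String)) (out : List String) : Decidable (Spec_start_player_to_play_list f_p s l out) := by unfold Spec_start_player_to_play_list; infer_instance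

-- ===== CLAIM (what is proved, stated in full; the proofs are below) =====
def Claim_equal_start_player_to_play_list : Prop := ∀ (f_p : String) (s : Option String) (l : Option (List String)), Dom_start_player_to_play_list f_p s l → Pre_start_player_to_play_list f_p s l → Spec_start_player_to_play_list f_p s l (start_player_to_play_list f_p s l)

-- ===== LEMMAS AND PROOFS =====

-- ===== VERDICT (by name: the statement is the Claim_ definition above) =====
theorem start_player_to_play_list_spec : Claim_equal_start_player_to_play_list := by
  intro f_p s l _ hpre
  unfold Spec_start_player_to_play_list
  rcases hpre with heq | ⟨hf, hs⟩
  · subst heq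
    simp [start_player_to_play_list, start_player_to_play_list_alt, goA]
  · -- finitely many (f_p, s) combinations; l.getD [] stays abstract and both
    -- sides reduce definitionally to the same l.getD [] ++ <literal list>
    fin_cases hf <;>
      rcases hs with rfl | ⟨x, hx, rfl⟩ <;>
      first
        | rfl
        | (fin_cases hx <;> rfl)
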